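-- pv_equiv track=rewrite | github.com/EdenGoforIt/Algorithm-CSharp-Java-Python | leetcode/CamelCase.py | process_split_word
-- ===== SOURCE A (Python) =====
-- def process_split_word(s):
--     result = ""
--     values = s.split(";")[2]
--     for i in range(len(values)):
--         c = values[i]
--         if c.isupper():
--             if i != 0:
--                 result += " "
--             result += c.lower()
--         else:
--             result += c
--     return result
-- ===== SOURCE B (Python) =====
-- def process_split_word(s):
--     values = s.split(";")[2]
--     starts = [i for i, c in enumerate(values) if c.isupper()]
--     if not starts or starts[0] != 0:
--         starts = [0] + starts
--     ends = starts[1:] + [len(values)]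
--     return " ".join(values[a:b].lower() for a, b in zip(starts, ends))
-- ===== Notes on version B (the rewrite author's own statement) =====
-- stated objective: alternative
-- what changed: B replaces A's single per-character concatenation loop by staged passes: first compute the list of uppercase positions, pad it with a leading 0, slice the string into segments at those boundaries, lowercase each whole segment and join with spaces.
import Mathlib
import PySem

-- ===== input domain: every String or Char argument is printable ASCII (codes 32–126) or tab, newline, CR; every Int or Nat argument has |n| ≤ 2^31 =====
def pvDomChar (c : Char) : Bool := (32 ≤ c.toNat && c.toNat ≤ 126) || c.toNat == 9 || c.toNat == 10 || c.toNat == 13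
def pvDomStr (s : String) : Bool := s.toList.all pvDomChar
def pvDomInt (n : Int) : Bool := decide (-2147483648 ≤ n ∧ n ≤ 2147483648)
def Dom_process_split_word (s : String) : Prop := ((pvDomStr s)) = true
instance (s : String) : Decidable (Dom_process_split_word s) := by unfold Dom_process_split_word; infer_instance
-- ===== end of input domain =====

-- B replaces A's per-character concatenation loop by staged passes: compute the list
-- of uppercase positions, pad it with a leading 0, slice the string into segments at
-- those boundaries, lowercase each segment and join with spaces.  Equal return values
-- proved on Pre_ (the inputs where A's s.split(';')[2] does not raise).

-- ===== PORT A =====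
def process_split_word (s : String) : String :=
  match PySem.List.pyGet? (PySem.Chars.splitOn s.toList [';']) 2 with
  | none => ""          -- Python raises IndexError here; excluded by Pre_
  | some cs =>
    String.ofList <| (PySem.List.pyRange 0 (cs.length : Int) 1).foldl
      (fun (result : List Char) i =>
        let c := PySem.List.pyGetD cs i ' '
        if PySem.Chars.isupper c then
          (if i ≠ 0 then result ++ [' '] else result) ++ [PySem.Chars.lowerChar c]
        else result ++ [c]) []

-- ===== PORT B =====
-- starts = [i for i, c in enumerate(values) if c.isupper()]
def pvStarts0 (cs : List Char) : List Int :=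
  ((PySem.List.enumerate cs 0).filter (fun p => PySem.Chars.isupper p.2)).map Prod.fst

-- if not starts or starts[0] != 0: starts = [0] + starts
def pvStarts (cs : List Char) : List Int :=
  if (pvStarts0 cs).head? = some 0 then pvStarts0 cs else 0 :: pvStarts0 cs

-- zip(starts, ends) with ends = starts[1:] + [len(values)], then the slices values[a:b]
def pvSegsB (cs : List Char) : List (List Char) :=
  let starts := pvStarts cs
  let ends := starts.tail ++ [(cs.length : Int)]
  (starts.zip ends).map (fun p => PySem.List.slice cs (some p.1) (some p.2))

def process_split_word_alt (s : String) : String :=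
  match PySem.List.pyGet? (PySem.Chars.splitOn s.toList [';']) 2 with
  | none => ""
  | some cs =>
    String.ofList (PySem.Chars.join [' '] ((pvSegsB cs).map PySem.Chars.lower))

-- ===== PRECONDITION & SPEC =====
-- Pre_ excludes exactly the inputs where A raises IndexError: s.split(";") must
-- have a third piece, i.e. s contains at least two ';'.
def Pre_process_split_word (s : String) : Prop :=
  3 ≤ (PySem.Chars.splitOn s.toList [';']).length
instance (s : String) : Decidable (Pre_process_split_word s) := by
  unfold Pre_process_split_word; infer_instance

def pvWitness_process_split_word : String := "x;y;helloWorldFoo"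

def Spec_process_split_word (s : String) (out : String) : Prop := out = process_split_word_alt s
instance (s : String) (out : String) : Decidable (Spec_process_split_word s out) := by unfold Spec_process_split_word; infer_instance

-- ===== CLAIM (what is proved, stated in full; the proofs are below) =====
def Claim_equal_process_split_word : Prop := ∀ (s : String), Dom_process_split_word s → Pre_process_split_word s → Spec_process_split_word s (process_split_word s)

-- ===== LEMMAS AND PROOFS =====

-- A common reference: the word list built left to right (new word on an uppercase,
-- already lowercased; otherwise extend the last word).
def pvExtendLast : List (List Char) → Char → List (List Char)
  | [], c => [[c]]
  | [w], c => [w ++ [c]]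
  | w :: ws, c => w :: pvExtendLast ws c

def pvStepB (words : List (List Char)) (c : Char) : List (List Char) :=
  if PySem.Chars.isupper c then words ++ [[PySem.Chars.lowerChar c]]
  else if words.isEmpty then [[c]]
  else pvExtendLast words c

-- the contribution of one non-first character to A's result
def pvBody (c : Char) : List Char :=
  if PySem.Chars.isupper c then [' ', PySem.Chars.lowerChar c] else [c]

theorem pvLowerChar_of_not_upper (c : Char) (h : PySem.Chars.isupper c = false) :
    PySem.Chars.lowerChar c = c := by
  unfold PySem.Chars.lowerChar; simp [h]

-- ---------- A's loop equals the join of the foldl word list ----------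

theorem pvTailA (rest : List Char) : ∀ (k : Int) (acc : List Char), 1 ≤ k →
    (PySem.List.enumerate rest k).foldl
      (fun (result : List Char) (p : Int × Char) =>
        if PySem.Chars.isupper p.2 then
          (if p.1 ≠ 0 then result ++ [' '] else result) ++ [PySem.Chars.lowerChar p.2]
        else result ++ [p.2]) acc
    = acc ++ rest.flatMap pvBody := by
  induction rest with
  | nil => intro k acc hk; simp [PySem.List.enumerate_nil]
  | cons c rest ih =>
    intro k acc hk
    have hk0 : k ≠ 0 := by omega
    simp only [PySem.List.enumerate_cons, List.foldl_cons, List.flatMap_cons]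
    rw [ih (k + 1) _ (by omega)]
    by_cases h : PySem.Chars.isupper c = true <;>
      simp [h, hk0, pvBody, List.append_assoc]

theorem pvJoin_append_singleton (ws : List (List Char)) (w : List Char) (h : ws ≠ []) :
    PySem.Chars.join [' '] (ws ++ [w]) = PySem.Chars.join [' '] ws ++ [' '] ++ w := by
  induction ws with
  | nil => exact absurd rfl h
  | cons a ws ih =>
    cases ws with
    | nil => simp [PySem.Chars.join_cons_cons, PySem.Chars.join_singleton]
    | cons b ws =>
      simp only [List.cons_append] at ih ⊢
      rw [PySem.Chars.join_cons_cons, ih (by simp), PySem.Chars.join_cons_cons]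
      simp [List.append_assoc]

theorem pvJoin_extendLast (ws : List (List Char)) (c : Char) (h : ws ≠ []) :
    PySem.Chars.join [' '] (pvExtendLast ws c) = PySem.Chars.join [' '] ws ++ [c] := by
  induction ws with
  | nil => exact absurd rfl h
  | cons a ws ih =>
    cases ws with
    | nil => simp [pvExtendLast, PySem.Chars.join_singleton]
    | cons b ws =>
      rw [show pvExtendLast (a :: b :: ws) c = a :: pvExtendLast (b :: ws) c from rfl]
      have hne : pvExtendLast (b :: ws) c ≠ [] := by
        cases ws <;> simp [pvExtendLast]
      obtain ⟨x, xs, hx⟩ := List.exists_cons_of_ne_nil hne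
      rw [PySem.Chars.join_cons_cons] at *
      rw [hx, PySem.Chars.join_cons_cons, ← hx, ih (by simp)]
      simp [List.append_assoc]

theorem pvExtendLast_ne_nil (ws : List (List Char)) (c : Char) : pvExtendLast ws c ≠ [] := by
  cases ws with
  | nil => simp [pvExtendLast]
  | cons a ws => cases ws <;> simp [pvExtendLast]

theorem pvStepB_ne_nil (ws : List (List Char)) (c : Char) : pvStepB ws c ≠ [] := by
  unfold pvStepB
  split_ifs with h1 h2
  · cases ws <;> simp
  · simp
  · exact pvExtendLast_ne_nil ws c

theorem pvTailB (rest : List Char) : ∀ (ws : List (List Char)), ws ≠ [] →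
    PySem.Chars.join [' '] (rest.foldl pvStepB ws)
    = PySem.Chars.join [' '] ws ++ rest.flatMap pvBody := by
  induction rest with
  | nil => intro ws hws; simp
  | cons c rest ih =>
    intro ws hws
    simp only [List.foldl_cons, List.flatMap_cons]
    rw [ih _ (pvStepB_ne_nil ws c)]
    have hstep : PySem.Chars.join [' '] (pvStepB ws c)
        = PySem.Chars.join [' '] ws ++ pvBody c := by
      unfold pvStepB pvBody
      by_cases h : PySem.Chars.isupper c = true
      · rw [if_pos h, if_pos h, pvJoin_append_singleton ws _ hws]
        simp [List.append_assoc]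
      · rw [if_neg h, if_neg h, if_neg (by simpa using hws)]
        exact pvJoin_extendLast ws c hws
    rw [hstep, List.append_assoc]

theorem pvLoopsA_eq (cs : List Char) :
    (PySem.List.pyRange 0 (cs.length : Int) 1).foldl
      (fun (result : List Char) i =>
        let c := PySem.List.pyGetD cs i ' '
        if PySem.Chars.isupper c then
          (if i ≠ 0 then result ++ [' '] else result) ++ [PySem.Chars.lowerChar c]
        else result ++ [c]) []
    = PySem.Chars.join [' '] (cs.foldl pvStepB []) := by
  have hEnum : PySem.List.enumerate cs 0
      = (PySem.List.pyRange 0 (cs.length : Int) 1).map (fun j => (j, PySem.List.pyGetD cs j ' ')) := by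
    simpa [PySem.List.len] using PySem.List.enumerate_eq_map_pyRange cs ' '
  have hA : (PySem.List.pyRange 0 (cs.length : Int) 1).foldl
      (fun (result : List Char) i =>
        let c := PySem.List.pyGetD cs i ' '
        if PySem.Chars.isupper c then
          (if i ≠ 0 then result ++ [' '] else result) ++ [PySem.Chars.lowerChar c]
        else result ++ [c]) []
      = (PySem.List.enumerate cs 0).foldl
        (fun (result : List Char) (p : Int × Char) =>
          if PySem.Chars.isupper p.2 then
            (if p.1 ≠ 0 then result ++ [' '] else result) ++ [PySem.Chars.lowerChar p.2]
          else result ++ [p.2]) [] := by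
    rw [hEnum, List.foldl_map]
  rw [hA]
  cases cs with
  | nil => simp [PySem.List.enumerate_nil, PySem.Chars.join_nil]
  | cons c rest =>
    simp only [PySem.List.enumerate_cons, List.foldl_cons]
    rw [show (0 : Int) + 1 = 1 from rfl, pvTailA rest 1 _ (by omega)]
    have hfirst : pvStepB [] c
        = [if PySem.Chars.isupper c then [PySem.Chars.lowerChar c] else [c]] := by
      unfold pvStepB; split_ifs <;> rfl
    rw [pvTailB rest _ (pvStepB_ne_nil [] c), hfirst]
    by_cases h : PySem.Chars.isupper c = true <;>
      simp [h, PySem.Chars.join_singleton]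

-- ---------- B's staged slicing equals the same foldl word list ----------

-- zip starts (starts.tail ++ [n]) as a recursion on the boundary list
def pvAdj : List Int → Int → List (Int × Int)
  | [], _ => []
  | [a], n => [(a, n)]
  | a :: b :: t, n => (a, b) :: pvAdj (b :: t) n

theorem pvZip_eq_adj (l : List Int) (n : Int) : l.zip (l.tail ++ [n]) = pvAdj l n := by
  induction l with
  | nil => simp [pvAdj]
  | cons a l ih =>
    cases l with
    | nil => simp [pvAdj]
    | cons b t => simpa [pvAdj] using ih

theorem pvAdj_append (l : List Int) (b n : Int) :
    pvAdj (l ++ [b]) n = pvAdj l b ++ [(b, n)] := by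
  induction l with
  | nil => simp [pvAdj]
  | cons a l ih =>
    cases l with
    | nil => simp [pvAdj]
    | cons a2 t => simpa [pvAdj] using ih

theorem pvMem_adj (l : List Int) (n : Int) (p : Int × Int) (hp : p ∈ pvAdj l n) :
    p.1 ∈ l ∧ (p.2 ∈ l ∨ p.2 = n) := by
  induction l with
  | nil => simp [pvAdj] at hp
  | cons a l ih =>
    cases l with
    | nil => simp [pvAdj] at hp; simp [hp]
    | cons b t =>
      rcases (by simpa [pvAdj] using hp : p = (a, b) ∨ p ∈ pvAdj (b :: t) n) with h | h
      · simp [h]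
      · rcases ih h with ⟨h1, h2⟩
        refine ⟨by simp [h1], ?_⟩
        rcases h2 with h2 | h2
        · exact Or.inl (by simp [h2])
        · exact Or.inr h2

theorem pvStarts0_append (cs : List Char) (c : Char) :
    pvStarts0 (cs ++ [c])
    = pvStarts0 cs ++ (if PySem.Chars.isupper c then [(cs.length : Int)] else []) := by
  unfold pvStarts0
  rw [PySem.List.enumerate_append]
  by_cases h : PySem.Chars.isupper c = true <;>
    simp [PySem.List.enumerate_cons, PySem.List.enumerate_nil, h]

theorem pvMem_starts0 (cs : List Char) (a : Int) (ha : a ∈ pvStarts0 cs) :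
    0 ≤ a ∧ a < (cs.length : Int) := by
  unfold pvStarts0 at ha
  simp only [List.mem_map, List.mem_filter] at ha
  obtain ⟨p, ⟨hmem, _⟩, hfst⟩ := ha
  rw [PySem.List.mem_enumerate_iff] at hmem
  obtain ⟨k, hk, hp⟩ := hmem
  subst hp; subst hfst
  constructor <;> [omega; exact_mod_cast by omega]

theorem pvMem_starts (cs : List Char) (a : Int) (ha : a ∈ pvStarts cs) :
    0 ≤ a ∧ a ≤ (cs.length : Int) := by
  unfold pvStarts at ha
  split_ifs at ha with h
  · have := pvMem_starts0 cs a ha; omega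
  · rcases (by simpa using ha : a = 0 ∨ a ∈ pvStarts0 cs) with h | h
    · omega
    · have := pvMem_starts0 cs a h; omega

theorem pvStarts_ne_nil (cs : List Char) : pvStarts cs ≠ [] := by
  unfold pvStarts
  split_ifs with h
  · intro hnil; rw [hnil] at h; simp at h
  · simp

theorem pvStarts_append_upper (cs : List Char) (c : Char) (hcs : cs ≠ [])
    (hc : PySem.Chars.isupper c = true) :
    pvStarts (cs ++ [c]) = pvStarts cs ++ [(cs.length : Int)] := by
  have hlen : (cs.length : Int) ≠ 0 := by
    have : cs.length ≠ 0 := by simpa using List.length_pos_of_ne_nil hcs |>.ne'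
    exact_mod_cast this
  unfold pvStarts
  rw [pvStarts0_append, if_pos hc]
  cases h0 : pvStarts0 cs with
  | nil => simp; exact hcs
  | cons a t => by_cases ha : a = 0 <;> simp [ha]

theorem pvStarts_append_lower (cs : List Char) (c : Char)
    (hc : PySem.Chars.isupper c = false) :
    pvStarts (cs ++ [c]) = pvStarts cs := by
  unfold pvStarts
  rw [pvStarts0_append, hc]
  simp

-- slices are stable under appending a character past their right end
theorem pvSlice_append (cs : List Char) (c : Char) (a b : Int)
    (ha : 0 ≤ a) (hb : 0 ≤ b) (hbn : b ≤ (cs.length : Int)) :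
    PySem.List.slice (cs ++ [c]) (some a) (some b) = PySem.List.slice cs (some a) (some b) := by
  rw [PySem.List.slice_toNat _ ha hb, PySem.List.slice_toNat _ ha hb]
  have hbn' : b.toNat ≤ cs.length := by omega
  by_cases hab : a.toNat ≤ cs.length
  · rw [List.drop_append_of_le_length hab,
      List.take_append_of_le_length (by simp [List.length_drop]; omega)]
  · have h1 : cs.drop a.toNat = [] := List.drop_eq_nil_of_le (by omega)
    have h2 : b.toNat - a.toNat = 0 := by omega
    simp [h2]

theorem pvSlice_last (cs : List Char) (c : Char) :
    PySem.List.slice (cs ++ [c]) (some (cs.length : Int)) (some ((cs.length : Int) + 1)) = [c] := by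
  rw [PySem.List.slice_toNat _ (by positivity) (by positivity)]
  have h1 : ((cs.length : Int)).toNat = cs.length := by omega
  have h2 : ((cs.length : Int) + 1).toNat = cs.length + 1 := by omega
  rw [h1, h2, List.drop_append_of_le_length (le_refl _)]
  simp

theorem pvSlice_extend (cs : List Char) (c : Char) (a : Int)
    (ha : 0 ≤ a) (han : a ≤ (cs.length : Int)) :
    PySem.List.slice (cs ++ [c]) (some a) (some ((cs.length : Int) + 1))
    = PySem.List.slice cs (some a) (some (cs.length : Int)) ++ [c] := by
  rw [PySem.List.slice_toNat _ ha (by positivity), PySem.List.slice_toNat _ ha (by positivity)]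
  have h2 : ((cs.length : Int) + 1).toNat = cs.length + 1 := by omega
  have h1 : ((cs.length : Int)).toNat = cs.length := by omega
  have ha' : a.toNat ≤ cs.length := by omega
  rw [h1, h2, List.drop_append_of_le_length ha',
    List.take_of_length_le (by simp [List.length_drop]; omega),
    List.take_of_length_le (by simp [List.length_drop])]

theorem pvSegsB_append (cs : List Char) (c : Char) (hcs : cs ≠ []) :
    pvSegsB (cs ++ [c])
    = if PySem.Chars.isupper c then pvSegsB cs ++ [[c]]
      else pvExtendLast (pvSegsB cs) c := by
  unfold pvSegsB
  simp only [pvZip_eq_adj]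
  by_cases hc : PySem.Chars.isupper c = true
  · rw [if_pos hc, pvStarts_append_upper cs c hcs hc, pvAdj_append, List.map_append,
      List.length_append]
    congr 1
    · refine List.map_congr_left fun p hp => ?_
      obtain ⟨h1, h2⟩ := pvMem_adj _ _ _ hp
      obtain ⟨ha1, ha2⟩ := pvMem_starts cs p.1 h1
      have hb : 0 ≤ p.2 ∧ p.2 ≤ (cs.length : Int) := by
        rcases h2 with h2 | h2
        · have := pvMem_starts cs p.2 h2; omega
        · omega
      exact pvSlice_append cs c p.1 p.2 ha1 hb.1 hb.2
    · simp only [List.map_cons, List.map_nil, List.length_cons, List.length_nil]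
      rw [show ((cs.length + 1 : Nat) : Int) = (cs.length : Int) + 1 by push_cast; ring]
      rw [pvSlice_last]
  · rw [if_neg hc, pvStarts_append_lower cs c (by simpa using hc)]
    rw [show ((cs ++ [c]).length : Int) = (cs.length : Int) + 1 by simp]
    have hbound := pvMem_starts cs
    have hne := pvStarts_ne_nil cs
    -- induction over the (nonempty) boundary list
    generalize hL : pvStarts cs = L at *
    clear hL
    induction L with
    | nil => exact absurd rfl hne
    | cons a L ih =>
      cases L with
      | nil =>
        obtain ⟨ha1, ha2⟩ := hbound a (by simp)
        simp [pvAdj, pvExtendLast, pvSlice_extend cs c a ha1 ha2]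
      | cons b t =>
        have hrec := ih (fun x hx => hbound x (by simp [hx])) (by simp)
        simp only [pvAdj, List.map_cons] at *
        rw [show pvExtendLast (PySem.List.slice cs (some a) (some b)
              :: (pvAdj (b :: t) (cs.length : Int)).map
                (fun p => PySem.List.slice cs (some p.1) (some p.2))) c
            = PySem.List.slice cs (some a) (some b)
              :: pvExtendLast ((pvAdj (b :: t) (cs.length : Int)).map
                (fun p => PySem.List.slice cs (some p.1) (some p.2))) c from by
          cases h : (pvAdj (b :: t) (cs.length : Int)).map
              (fun p => PySem.List.slice cs (some p.1) (some p.2)) with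
          | nil => cases t <;> simp [pvAdj] at h
          | cons x xs => simp [pvExtendLast]]
        rw [← hrec]
        obtain ⟨ha1, _⟩ := hbound a (by simp)
        obtain ⟨hb1, hb2⟩ := hbound b (by simp)
        rw [pvSlice_append cs c a b ha1 hb1 hb2]

theorem pvFoldlB_ne_nil (rest : List Char) : ∀ (ws : List (List Char)), ws ≠ [] →
    rest.foldl pvStepB ws ≠ [] := by
  induction rest with
  | nil => intro ws hws; simpa using hws
  | cons c rest ih => intro ws _; exact ih _ (pvStepB_ne_nil ws c)

theorem pvMapLower_extendLast (ws : List (List Char)) (c : Char) :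
    (pvExtendLast ws c).map PySem.Chars.lower
    = pvExtendLast (ws.map PySem.Chars.lower) (PySem.Chars.lowerChar c) := by
  induction ws with
  | nil => simp [pvExtendLast, PySem.Chars.lower]
  | cons a ws ih =>
    cases ws with
    | nil => simp [pvExtendLast, PySem.Chars.lower]
    | cons b t =>
      rw [show pvExtendLast (a :: b :: t) c = a :: pvExtendLast (b :: t) c from rfl]
      simp only [List.map_cons] at *
      rw [ih]
      rfl

theorem pvStepB_lower (ws : List (List Char)) (c : Char)
    (h : PySem.Chars.isupper c = false) (hws : ws ≠ []) :
    pvStepB ws c = pvExtendLast ws c := by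
  unfold pvStepB
  rw [if_neg (by simp [h]), if_neg (by simpa using hws)]

theorem pvSegsB_single (c : Char) : pvSegsB [c] = [[c]] := by
  unfold pvSegsB pvStarts pvStarts0
  by_cases h : PySem.Chars.isupper c = true <;>
    simp [PySem.List.enumerate_cons, PySem.List.enumerate_nil, h, PySem.List.slice_toNat]

theorem pvSegs_lower (cs : List Char) (hcs : cs ≠ []) :
    (pvSegsB cs).map PySem.Chars.lower = cs.foldl pvStepB [] := by
  induction cs using List.reverseRecOn with
  | nil => exact absurd rfl hcs
  | append_singleton l c ih =>
    by_cases hlne : l = []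
    · subst hlne
      by_cases h : PySem.Chars.isupper c = true <;>
        simp [pvSegsB_single, pvStepB, PySem.Chars.lower, h, pvLowerChar_of_not_upper]
    · rw [pvSegsB_append l c hlne, List.foldl_append]
      have hfoldne : l.foldl pvStepB [] ≠ [] := by
        obtain ⟨d, rest, rfl⟩ := List.exists_cons_of_ne_nil hlne
        simpa using pvFoldlB_ne_nil rest (pvStepB [] d) (pvStepB_ne_nil [] d)
      simp only [List.foldl_cons, List.foldl_nil]
      by_cases h : PySem.Chars.isupper c = true
      · rw [if_pos h, List.map_append, ih hlne]
        simp [pvStepB, h, PySem.Chars.lower]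
      · rw [if_neg (by simp [h]), pvMapLower_extendLast, ih hlne,
          pvLowerChar_of_not_upper c (by simpa using h),
          pvStepB_lower _ c (by simpa using h) hfoldne]

-- ===== VERDICT (by name: the statement is the Claim_ definition above) =====
theorem process_split_word_spec : Claim_equal_process_split_word := by
  intro s _ hpre
  unfold Spec_process_split_word process_split_word process_split_word_alt
  cases hv : PySem.List.pyGet? (PySem.Chars.splitOn s.toList [';']) 2 with
  | none =>
    exfalso
    unfold Pre_process_split_word at hpre
    rw [show (2 : Int) = ((2 : Nat) : Int) from rfl, PySem.List.pyGet?_natCast] at hv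
    rw [List.getElem?_eq_none_iff] at hv
    omega
  | some cs =>
    refine congrArg String.ofList ?_
    rw [pvLoopsA_eq]
    cases hcs : cs with
    | nil => decide
    | cons d rest =>
      rw [← hcs, ← pvSegs_lower cs (by simp [hcs])]
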